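-- pv_equiv track=rewrite | github.com/joachimhviid/game-ai-pcg | minidungeon-pcg/src/minidungeon_pcg/pcg/generator.py | calculate_min_distance_between_entities
-- ===== SOURCE A (Python) =====
-- from typing import List, Tuple, Dict
--
-- def calculate_min_distance_between_entities(
--     positions: List[Tuple[int, int]]
-- ) -> float:
--     if len(positions) < 2:
--         return 0
--     min_dist = float("inf")
--     for i in range(len(positions)):
--         for j in range(i + 1, len(positions)):
--             dist = abs(positions[i][0] - positions[j][0]) + abs(
--                 positions[i][1] - positions[j][1]
--             )
--             min_dist = min(min_dist, dist)
--     return min_dist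
-- ===== SOURCE B (Python) =====
-- def calculate_min_distance_between_entities(positions):
--     if len(positions) < 2:
--         return 0
--     pts = sorted(((p[0] + p[1], p[0] - p[1]) for p in positions), key=lambda t: t[0])
--     best = None
--     for i, (u, v) in enumerate(pts):
--         for u2, v2 in pts[i + 1:]:
--             if best is not None and u2 - u >= best:
--                 break
--             d = max(u2 - u, abs(v - v2))
--             if best is None or d < best:
--                 best = d
--     return best
-- ===== Notes on version B (the rewrite author's own statement) =====
-- stated objective: faster
-- what changed: B rotates to Chebyshev coordinates (u=x+y, v=x-y, so |dx|+|dy| = max(|du|,|dv|)), sorts the points by u once, and scans each point only against later points, breaking the inner scan as soon as the u-gap reaches the current best; A compares all pairs.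
import Mathlib
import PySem

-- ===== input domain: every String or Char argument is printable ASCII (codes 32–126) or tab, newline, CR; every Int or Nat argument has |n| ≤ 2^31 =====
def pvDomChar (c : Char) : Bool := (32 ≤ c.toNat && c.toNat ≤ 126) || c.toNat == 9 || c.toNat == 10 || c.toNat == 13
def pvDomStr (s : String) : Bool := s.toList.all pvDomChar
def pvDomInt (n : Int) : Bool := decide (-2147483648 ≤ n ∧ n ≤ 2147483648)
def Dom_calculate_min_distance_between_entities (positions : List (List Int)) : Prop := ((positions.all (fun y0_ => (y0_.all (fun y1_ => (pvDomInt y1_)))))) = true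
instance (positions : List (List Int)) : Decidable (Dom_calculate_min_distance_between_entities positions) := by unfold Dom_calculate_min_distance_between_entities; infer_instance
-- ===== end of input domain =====

-- B replaces A's all-pairs O(n^2) scan by an L1->Linf rotation (u=x+y, v=x-y), a sort by u,
-- and a pruned sweep that breaks the inner scan once the u-gap reaches the current best (measured faster).


-- ===== PORT A =====
-- min_dist = float("inf") is modelled exactly as (none : Option Int): min(inf, d) = d, and with
-- len(positions) ≥ 2 the loops run at least once, so the result is an int (the final .getD 0 is dead).
def calculate_min_distance_between_entities (positions : List (List Int)) : Int :=
  if positions.length < 2 then 0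
  else
    let md := (PySem.List.pyRange 0 (positions.length : Int) 1).foldl (fun md i =>
      (PySem.List.pyRange (i + 1) (positions.length : Int) 1).foldl (fun md j =>
        let pi := PySem.List.pyGetD positions i []
        let pj := PySem.List.pyGetD positions j []
        let dist := |PySem.List.pyGetD pi 0 0 - PySem.List.pyGetD pj 0 0| +
                    |PySem.List.pyGetD pi 1 0 - PySem.List.pyGetD pj 1 0|
        match md with
        | none => some dist
        | some b => some (min b dist)) md) (none : Option Int)
    md.getD 0

-- ===== PORT B =====
-- inner loop of Source B: 'for u2, v2 in pts[i+1:]: if best is not None and u2 - u >= best: break; …'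
def pvInner (u v : Int) : List (Int × Int) → Option Int → Option Int
  | [], best => best
  | (u2, v2) :: rest, best =>
    match best with
    | some b =>
      if b ≤ u2 - u then some b            -- the 'break': the rest of the suffix is skipped
      else
        let d := max (u2 - u) |v - v2|
        pvInner u v rest (some (if d < b then d else b))
    | none =>
        let d := max (u2 - u) |v - v2|
        pvInner u v rest (some d)

-- outer loop of Source B: 'for i, (u, v) in enumerate(pts):' with the suffix pts[i+1:]
def pvSweep : List (Int × Int) → Option Int → Option Int
  | [], best => best
  | (u, v) :: rest, best => pvSweep rest (pvInner u v rest best)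

-- best is an int whenever len(positions) ≥ 2 (the sweep sees at least one pair), so .getD 0 is dead.
def calculate_min_distance_between_entities_alt (positions : List (List Int)) : Int :=
  if positions.length < 2 then 0
  else
    let pts := PySem.List.sorted (positions.map (fun p =>
        (PySem.List.pyGetD p 0 0 + PySem.List.pyGetD p 1 0,
         PySem.List.pyGetD p 0 0 - PySem.List.pyGetD p 1 0))) (fun t => t.1) false
    (pvSweep pts none).getD 0

-- ===== PRECONDITION & SPEC =====
-- Pre_ excludes exactly the inputs on which Python A raises IndexError: when there are ≥ 2
-- positions, every position must have at least 2 coordinates (A reads p[0] and p[1]).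
def Pre_calculate_min_distance_between_entities (positions : List (List Int)) : Prop :=
  2 ≤ positions.length → ∀ p ∈ positions, 2 ≤ p.length
instance (positions : List (List Int)) : Decidable (Pre_calculate_min_distance_between_entities positions) := by unfold Pre_calculate_min_distance_between_entities; infer_instance

def pvWitness_calculate_min_distance_between_entities : List (List Int) := [[0, 0], [3, 4], [-1, 2]]

def Spec_calculate_min_distance_between_entities (positions : List (List Int)) (out : Int) : Prop := out = calculate_min_distance_between_entities_alt positions
instance (positions : List (List Int)) (out : Int) : Decidable (Spec_calculate_min_distance_between_entities positions out) := by unfold Spec_calculate_min_distance_between_entities; infer_instance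

-- ===== CLAIM (what is proved, stated in full; the proofs are below) =====
def Claim_equal_calculate_min_distance_between_entities : Prop := ∀ (positions : List (List Int)), Dom_calculate_min_distance_between_entities positions → Pre_calculate_min_distance_between_entities positions → Spec_calculate_min_distance_between_entities positions (calculate_min_distance_between_entities positions)

-- ===== LEMMAS AND PROOFS =====

-- 'min(best, d)' with best = None meaning infinity
def pvPush (md : Option Int) (d : Int) : Option Int :=
  match md with
  | none => some d
  | some b => some (min b d)

-- all distances of unordered pairs (i < j), in A's traversal order
def pvPairs {α : Type} (δ : α → α → Int) : List α → List Int
  | [] => []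
  | x :: xs => xs.map (δ x) ++ pvPairs δ xs

-- the generic brute-force loop: for each suffix head, fold its tail into the accumulator
def pvBrute {α : Type} (δ : α → α → Int) : List α → Option Int → Option Int
  | [], md => md
  | p :: rest, md => pvBrute δ rest (rest.foldl (fun md q => pvPush md (δ p q)) md)

def pvMdist (p q : List Int) : Int :=
  |PySem.List.pyGetD p 0 0 - PySem.List.pyGetD q 0 0| +
  |PySem.List.pyGetD p 1 0 - PySem.List.pyGetD q 1 0|

def pvRot (p : List Int) : Int × Int :=
  (PySem.List.pyGetD p 0 0 + PySem.List.pyGetD p 1 0,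
   PySem.List.pyGetD p 0 0 - PySem.List.pyGetD p 1 0)

def pvChb (p q : Int × Int) : Int := max |p.1 - q.1| |p.2 - q.2|

def pvCd (p q : Int × Int) : Int := max (q.1 - p.1) |p.2 - q.2|

-- ---- generic fold facts ----

lemma pv_foldl_push_some (l : List Int) : ∀ b : Int, l.foldl pvPush (some b) = some (l.foldl min b) := by
  induction l with
  | nil => intro b; rfl
  | cons d t ih => intro b; simpa [pvPush] using ih (min b d)

lemma pv_foldl_push_none (l : List Int) : l.foldl pvPush none = l.min? := by
  cases l with
  | nil => rfl
  | cons d t => simpa [pvPush, List.min?] using pv_foldl_push_some t d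

lemma pv_foldl_push_ge (l : List Int) : ∀ b : Int, (∀ d ∈ l, b ≤ d) → l.foldl pvPush (some b) = some b := by
  induction l with
  | nil => intro b _; rfl
  | cons d t ih =>
    intro b h
    have hb : min b d = b := by have := h d (by simp); omega
    simp only [List.foldl_cons, pvPush, hb]
    exact ih b (fun x hx => h x (by simp [hx]))

lemma pv_brute_eq_pairs {α : Type} (δ : α → α → Int) (l : List α) :
    ∀ md, pvBrute δ l md = (pvPairs δ l).foldl pvPush md := by
  induction l with
  | nil => intro md; rfl
  | cons p rest ih =>
    intro md
    simp only [pvBrute, pvPairs, List.foldl_append, ih, List.foldl_map]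

-- ---- A's double index loop is pvBrute pvMdist ----

lemma pv_A_outer (positions : List (List Int)) :
    ∀ (n : Nat) (a : Int), 0 ≤ a → (positions.length : Int) - a ≤ n →
    (PySem.List.pyRange a (positions.length : Int) 1).foldl (fun md i =>
      (PySem.List.pyRange (i + 1) (positions.length : Int) 1).foldl (fun md j =>
        pvPush md (pvMdist (PySem.List.pyGetD positions i []) (PySem.List.pyGetD positions j []))) md)
      md
    = pvBrute pvMdist (positions.drop a.toNat) md := by
  intro n
  induction n generalizing md with
  | zero =>
    intro a ha hn
    rw [PySem.List.pyRange_one_eq_nil (by omega), List.drop_eq_nil_of_le (by omega)]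
    rfl
  | succ n ih =>
    intro a ha hn
    by_cases hlt : a < (positions.length : Int)
    · rw [PySem.List.pyRange_one_cons hlt]
      simp only [List.foldl_cons]
      have h1 : (a + 1).toNat = a.toNat + 1 := by omega
      have hidx : a.toNat < positions.length := by omega
      have hdrop : positions.drop a.toNat = positions[a.toNat] :: positions.drop (a.toNat + 1) :=
        List.drop_eq_getElem_cons hidx
      have hinner :
          (PySem.List.pyRange (a + 1) (positions.length : Int) 1).foldl (fun md j =>
            pvPush md (pvMdist (PySem.List.pyGetD positions a []) (PySem.List.pyGetD positions j []))) md
          = (positions.drop ((a + 1).toNat)).foldl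
              (fun md q => pvPush md (pvMdist (PySem.List.pyGetD positions a []) q)) md :=
        PySem.List.foldl_pyRange_pyGetD' positions []
          (fun md q => pvPush md (pvMdist (PySem.List.pyGetD positions a []) q)) md (by omega)
      rw [hinner, h1, ih (a + 1) (by omega) (by omega), hdrop]
      simp only [pvBrute, h1]
      rw [PySem.List.pyGetD_eq_getElem positions [] ha (by exact_mod_cast hlt)]
    · rw [PySem.List.pyRange_one_eq_nil (by omega), List.drop_eq_nil_of_le (by omega)]
      rfl

-- ---- B's pruned inner scan equals the unpruned fold on a u-sorted suffix ----

lemma pv_if_min (b d : Int) : (if d < b then d else b) = min b d := by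
  split <;> omega

lemma pv_inner_eq (u v : Int) (rest : List (Int × Int))
    (hs : rest.Pairwise (fun p q : Int × Int => p.1 ≤ q.1)) :
    ∀ best, pvInner u v rest best
      = rest.foldl (fun md q => pvPush md (pvCd (u, v) q)) best := by
  induction rest with
  | nil => intro best; rfl
  | cons hd t ih =>
    obtain ⟨u2, v2⟩ := hd
    rw [List.pairwise_cons] at hs
    intro best
    match best with
    | none =>
      simp only [pvInner, List.foldl_cons, pvPush, pvCd]
      exact ih hs.2 _
    | some b =>
      simp only [pvInner]
      by_cases hbr : b ≤ u2 - u
      · rw [if_pos hbr]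
        have hall : ∀ d ∈ ((u2, v2) :: t).map (fun q => pvCd (u, v) q), b ≤ d := by
          intro d hd
          simp only [List.mem_map] at hd
          obtain ⟨q, hq, rfl⟩ := hd
          have hu2 : u2 ≤ q.1 := by
            rcases List.mem_cons.mp hq with h | h
            · rw [h]
            · exact hs.1 q h
          simp only [pvCd]
          have : b ≤ q.1 - u := by omega
          exact le_trans this (le_max_left _ _)
        have h := pv_foldl_push_ge (((u2, v2) :: t).map (fun q => pvCd (u, v) q)) b hall
        rw [List.foldl_map] at h
        exact h.symm
      · rw [if_neg hbr, ih hs.2]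
        simp only [List.foldl_cons, pvPush, pvCd, pv_if_min]

lemma pv_sweep_eq (pts : List (Int × Int))
    (hs : pts.Pairwise (fun p q : Int × Int => p.1 ≤ q.1)) :
    ∀ best, pvSweep pts best = pvBrute pvCd pts best := by
  induction pts with
  | nil => intro best; rfl
  | cons hd t ih =>
    obtain ⟨u, v⟩ := hd
    rw [List.pairwise_cons] at hs
    intro best
    simp only [pvSweep, pvBrute, pv_inner_eq u v t hs.2 best, ih hs.2]

-- ---- pvPairs: congruence, map, permutation ----

lemma pv_pairs_congr {α : Type} (δ δ' : α → α → Int) (R : α → α → Prop) :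
    ∀ (l : List α), l.Pairwise R → (∀ p q, R p q → δ p q = δ' p q) →
    pvPairs δ l = pvPairs δ' l := by
  intro l
  induction l with
  | nil => intro _ _; rfl
  | cons x xs ih =>
    intro hp h
    rw [List.pairwise_cons] at hp
    simp only [pvPairs, ih hp.2 h]
    congr 1
    exact List.map_congr_left (fun q hq => h x q (hp.1 q hq))

lemma pv_pairs_map {α β : Type} (f : α → β) (δ : β → β → Int) :
    ∀ l : List α, pvPairs δ (l.map f) = pvPairs (fun a b => δ (f a) (f b)) l := by
  intro l
  induction l with
  | nil => rfl
  | cons x xs ih => simp only [List.map_cons, pvPairs, ih, List.map_map]; rfl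

lemma pv_pairs_perm {α : Type} (δ : α → α → Int) (hsym : ∀ a b, δ a b = δ b a)
    {l₁ l₂ : List α} (h : l₁.Perm l₂) : (pvPairs δ l₁).Perm (pvPairs δ l₂) := by
  induction h with
  | nil => exact List.Perm.refl _
  | cons x h ih => exact List.Perm.append (h.map _) ih
  | swap x y l =>
    simp only [pvPairs, List.map_cons, hsym y x, List.cons_append]
    refine List.Perm.cons _ ?_
    rw [← List.append_assoc, ← List.append_assoc]
    exact List.Perm.append_right _ (List.perm_append_comm)
  | trans h₁ h₂ ih₁ ih₂ => exact ih₁.trans ih₂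

lemma pv_push_push_comm (md : Option Int) (x y : Int) :
    pvPush (pvPush md x) y = pvPush (pvPush md y) x := by
  cases md <;> simp only [pvPush] <;> congr 1 <;> omega

lemma pv_foldl_push_perm {l₁ l₂ : List Int} (h : l₁.Perm l₂) :
    ∀ md, l₁.foldl pvPush md = l₂.foldl pvPush md := by
  induction h with
  | nil => intro md; rfl
  | cons x h ih => intro md; simpa using ih (pvPush md x)
  | swap x y l => intro md; simp only [List.foldl_cons, pv_push_push_comm]
  | trans h₁ h₂ ih₁ ih₂ => intro md; exact (ih₁ md).trans (ih₂ md)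

-- min? is permutation-invariant
lemma pv_min?_perm {l₁ l₂ : List Int} (h : l₁.Perm l₂) : l₁.min? = l₂.min? := by
  rw [← pv_foldl_push_none, ← pv_foldl_push_none, pv_foldl_push_perm h]

-- ---- the rotation identity ----

lemma pv_chb_rot (p q : List Int) : pvChb (pvRot p) (pvRot q) = pvMdist p q := by
  simp only [pvChb, pvRot, pvMdist]
  generalize PySem.List.pyGetD p 0 0 = a
  generalize PySem.List.pyGetD p 1 0 = b
  generalize PySem.List.pyGetD q 0 0 = c
  generalize PySem.List.pyGetD q 1 0 = d
  simp only [Int.abs_eq_natAbs]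
  omega

lemma pv_cd_eq_chb (p q : Int × Int) (h : p.1 ≤ q.1) : pvCd p q = pvChb p q := by
  simp only [pvCd, pvChb, Int.abs_eq_natAbs]
  omega

lemma pv_chb_symm (a b : Int × Int) : pvChb a b = pvChb b a := by
  simp only [pvChb, abs_sub_comm]

-- ===== VERDICT (by name: the statement is the Claim_ definition above) =====
theorem calculate_min_distance_between_entities_spec : Claim_equal_calculate_min_distance_between_entities := by
  intro positions _ _
  unfold Spec_calculate_min_distance_between_entities
  by_cases h2 : positions.length < 2
  · unfold calculate_min_distance_between_entities calculate_min_distance_between_entities_alt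
    rw [if_pos h2, if_pos h2]
  · have hAv : calculate_min_distance_between_entities positions
        = ((pvPairs pvMdist positions).min?).getD 0 := by
      unfold calculate_min_distance_between_entities
      rw [if_neg h2]
      show ((PySem.List.pyRange 0 (positions.length : Int) 1).foldl (fun md i =>
        (PySem.List.pyRange (i + 1) (positions.length : Int) 1).foldl (fun md j =>
          pvPush md (pvMdist (PySem.List.pyGetD positions i []) (PySem.List.pyGetD positions j []))) md)
        (none : Option Int)).getD 0 = _
      rw [pv_A_outer (md := (none : Option Int)) positions positions.length 0 (le_refl 0) (by omega)]
      rw [Int.toNat_zero, List.drop_zero, pv_brute_eq_pairs, pv_foldl_push_none]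
    have hBv : calculate_min_distance_between_entities_alt positions
        = ((pvPairs pvCd (PySem.List.sorted (positions.map pvRot) (fun t => t.1) false)).min?).getD 0 := by
      unfold calculate_min_distance_between_entities_alt
      rw [if_neg h2]
      show ((pvSweep (PySem.List.sorted (positions.map pvRot) (fun t => t.1) false) none).getD 0) = _
      rw [pv_sweep_eq _ (PySem.List.sorted_pairwise _ _) none, pv_brute_eq_pairs, pv_foldl_push_none]
    rw [hAv, hBv]
    have e1 : pvPairs pvCd (PySem.List.sorted (positions.map pvRot) (fun t => t.1) false)
        = pvPairs pvChb (PySem.List.sorted (positions.map pvRot) (fun t => t.1) false) :=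
      pv_pairs_congr pvCd pvChb _ _ (PySem.List.sorted_pairwise _ _) pv_cd_eq_chb
    have e2 : (pvPairs pvChb (PySem.List.sorted (positions.map pvRot) (fun t => t.1) false)).Perm
        (pvPairs pvChb (positions.map pvRot)) :=
      pv_pairs_perm pvChb pv_chb_symm (PySem.List.sorted_perm (positions.map pvRot) (fun t => t.1) false)
    have e3 : pvPairs pvChb (positions.map pvRot) = pvPairs pvMdist positions := by
      rw [pv_pairs_map pvRot pvChb positions]
      have hfe : (fun a b => pvChb (pvRot a) (pvRot b)) = pvMdist :=
        funext fun a => funext fun b => pv_chb_rot a b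
      rw [hfe]
    rw [e1, pv_min?_perm e2, e3]
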